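-- pv_equiv track=rewrite | github.com/PointBreaker/algorithms | divide_and_conquer/pattern_match.py | naive_match
-- ===== SOURCE A (Python) =====
-- def naive_match(sequence, pattern, k=0):
--     res = []
--     n = len(pattern)
--     m = len(sequence)
--     goal = n - k
--     for i in range(m - n + 1):
--         t = 0
--         for j in range(n):
--             if sequence[i + j] == pattern[j]:
--                 t += 1
--         if t >= goal:
--             res.append(i)
--     return res
-- ===== SOURCE B (Python) =====
-- def _lower(lst, x):
--     # first index t with lst[t] >= x (lst ascending)
--     lo, hi = 0, len(lst)
--     while lo < hi:
--         mid = (lo + hi) // 2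
--         if lst[mid] < x:
--             lo = mid + 1
--         else:
--             hi = mid
--     return lo
--
--
-- def naive_match(sequence, pattern, k=0):
--     n = len(pattern)
--     m = len(sequence)
--     w = m - n + 1
--     if w <= 0:
--         return []
--     # index the sequence once: character -> ascending list of positions
--     pos = {}
--     for q, c in enumerate(sequence):
--         pos.setdefault(c, []).append(q)
--     # sparse match-counting: for pattern offset j only positions in [j, j+w)
--     # yield a valid alignment; locate that window by binary search
--     counts = [0] * w
--     for j, c in enumerate(pattern):
--         lst = pos.get(c, [])
--         lo = _lower(lst, j)
--         hi = _lower(lst, j + w)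
--         for q in lst[lo:hi]:
--             counts[q - j] += 1
--     return [i for i in range(w) if counts[i] >= n - k]
-- ===== Notes on version B (the rewrite author's own statement) =====
-- stated objective: alternative
-- what changed: B replaces A's per-alignment rescan of the pattern by building a character-to-positions index of the sequence once, binary-searching each offset's valid position window, and crediting each matching (position, offset) pair to its alignment counter; output-sensitive cost instead of the fixed alignments-times-pattern scan.
import Mathlib
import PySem

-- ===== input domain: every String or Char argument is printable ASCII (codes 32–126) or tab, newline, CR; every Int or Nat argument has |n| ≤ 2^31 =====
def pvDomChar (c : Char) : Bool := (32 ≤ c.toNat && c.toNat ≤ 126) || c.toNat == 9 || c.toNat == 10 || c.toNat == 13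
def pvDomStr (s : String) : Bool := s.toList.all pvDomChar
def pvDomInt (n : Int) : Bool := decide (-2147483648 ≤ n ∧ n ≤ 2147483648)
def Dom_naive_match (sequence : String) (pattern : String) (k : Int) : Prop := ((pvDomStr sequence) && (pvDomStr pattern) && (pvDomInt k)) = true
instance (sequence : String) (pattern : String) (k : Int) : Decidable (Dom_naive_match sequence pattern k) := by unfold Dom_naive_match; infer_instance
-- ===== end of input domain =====

-- B replaces the per-alignment rescan with a one-pass character→positions index plus a
-- binary-searched window of positions per pattern offset (objective: alternative,
-- output-sensitive algorithm; not uniformly faster).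

-- ===== PORT A =====
-- literal transliteration of A: for each alignment i, rescan the pattern counting matches
def naive_match (sequence : String) (pattern : String) (k : Int) : List Int :=
  let res : List Int := []
  let n : Int := PySem.List.len pattern.toList
  let m : Int := PySem.List.len sequence.toList
  let goal : Int := n - k
  (PySem.List.pyRange 0 (m - n + 1) 1).foldl
    (fun res i =>
      let t : Int := (PySem.List.pyRange 0 n 1).foldl
        (fun t j =>
          if PySem.List.pyGet? sequence.toList (i + j) == PySem.List.pyGet? pattern.toList j
          then t + 1 else t) 0
      if t ≥ goal then res ++ [i] else res)
    res

-- ===== PORT B =====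
-- B-side helper: transliteration of _lower (binary search: first index with lst[t] >= x);
-- the fuel argument only makes the while-loop recursion structural (hi - lo ≤ fuel always holds)
def pvLowerGo (lst : List Int) (x : Int) : Nat → Nat → Nat → Nat
  | 0, lo, _ => lo
  | fuel + 1, lo, hi =>
    if lo < hi then
      let mid := (lo + hi) / 2
      if lst.getD mid 0 < x then pvLowerGo lst x fuel (mid + 1) hi
      else pvLowerGo lst x fuel lo mid
    else lo

-- literal transliteration of B (Source B): index the sequence once, binary-search each
-- offset's valid window of positions, credit each pair to its alignment counter
def naive_match_alt (sequence : String) (pattern : String) (k : Int) : List Int :=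
  let n : Int := PySem.List.len pattern.toList
  let m : Int := PySem.List.len sequence.toList
  let w : Int := m - n + 1
  if w ≤ 0 then []
  else
    -- pos.setdefault(c, []).append(q)  ≡  pos[c] = pos.get(c, []) + [q]  ≡  Dict.modify
    let pos : PySem.Dict Char (List Int) :=
      (PySem.List.enumerate sequence.toList 0).foldl
        (fun d pc => d.modify pc.2 [] (fun l => l ++ [pc.1])) PySem.Dict.empty
    let counts : List Int := List.replicate w.toNat 0
    let counts : List Int :=
      (PySem.List.enumerate pattern.toList 0).foldl
        (fun cs jc =>
          let lst := pos.getD jc.2 []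
          let lo := pvLowerGo lst jc.1 lst.length 0 lst.length
          let hi := pvLowerGo lst (jc.1 + w) lst.length 0 lst.length
          (PySem.List.slice lst (some (lo : Int)) (some (hi : Int))).foldl
            (fun cs q => cs.modify (q - jc.1).toNat (fun t => t + 1)) cs)
        counts
    (PySem.List.pyRange 0 w 1).filter (fun i => decide (PySem.List.pyGetD counts i 0 ≥ n - k))

-- ===== PRECONDITION & SPEC =====
def Spec_naive_match (sequence : String) (pattern : String) (k : Int) (out : List Int) : Prop := out = naive_match_alt sequence pattern k
instance (sequence : String) (pattern : String) (k : Int) (out : List Int) : Decidable (Spec_naive_match sequence pattern k out) := by unfold Spec_naive_match; infer_instance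

-- ===== CLAIM (what is proved, stated in full; the proofs are below) =====
def Claim_equal_naive_match : Prop := ∀ (sequence : String) (pattern : String) (k : Int), Dom_naive_match sequence pattern k → Spec_naive_match sequence pattern k (naive_match sequence pattern k)

-- ===== LEMMAS AND PROOFS =====
-- getD after a point modification
lemma pvGetD_modify (l : List Int) (m n : Nat) (f : Int → Int) :
    (l.modify m f).getD n 0 = if m = n ∧ n < l.length then f (l.getD n 0) else l.getD n 0 := by
  simp only [List.getD, List.getElem?_modify]
  by_cases h1 : m = n <;> by_cases h2 : n < l.length
  · simp [h1, h2]
  · simp [h1, h2]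
  · simp [h1, h2]
  · simp [h1, h2]

lemma pvGetD_replicate (n i : Nat) : (List.replicate n (0:Int)).getD i 0 = 0 := by
  simp only [List.getD, List.getElem?_replicate]
  split <;> simp

-- strict monotonicity of a (<)-pairwise list, in getD form
lemma pvSortedGetD (lst : List Int) (hs : lst.Pairwise (· < ·)) (a b : Nat)
    (hab : a < b) (hb : b < lst.length) : lst.getD a 0 < lst.getD b 0 := by
  rw [List.getD_eq_getElem lst 0 (by omega), List.getD_eq_getElem lst 0 hb]
  exact List.pairwise_iff_getElem.mp hs a b (by omega) hb hab

-- binary-search soundness: pvLowerGo separates the list at a point where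
-- everything to the left is < x and everything to the right is ≥ x
lemma pvLowerGo_spec (lst : List Int) (x : Int) (hs : lst.Pairwise (· < ·)) :
    ∀ (fuel lo hi : Nat), hi - lo ≤ fuel → hi ≤ lst.length → lo ≤ hi →
    (∀ t, t < lo → lst.getD t 0 < x) → (∀ t, hi ≤ t → t < lst.length → x ≤ lst.getD t 0) →
    (pvLowerGo lst x fuel lo hi ≤ lst.length) ∧
    (∀ t, t < pvLowerGo lst x fuel lo hi → lst.getD t 0 < x) ∧
    (∀ t, pvLowerGo lst x fuel lo hi ≤ t → t < lst.length → x ≤ lst.getD t 0) := by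
  intro fuel
  induction fuel with
  | zero =>
    intro lo hi hfl hhil hlohi hleft hright
    have hlh : lo = hi := by omega
    subst hlh
    exact ⟨by simpa [pvLowerGo] using hhil,
      fun t ht => hleft t (by simpa [pvLowerGo] using ht),
      fun t ht htl => hright t (by simpa [pvLowerGo] using ht) htl⟩
  | succ fuel ih =>
    intro lo hi hfl hhil hlohi hleft hright
    rw [pvLowerGo]
    by_cases h : lo < hi
    · rw [if_pos h]
      dsimp only
      by_cases hm : lst.getD ((lo + hi) / 2) 0 < x
      · rw [if_pos hm]
        refine ih ((lo + hi) / 2 + 1) hi (by omega) hhil (by omega) ?_ hright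
        intro t ht
        by_cases htm : t = (lo + hi) / 2
        · simpa [htm] using hm
        · by_cases hto : t < lo
          · exact hleft t hto
          · exact lt_trans (pvSortedGetD lst hs t ((lo + hi) / 2) (by omega) (by omega)) hm
      · rw [if_neg hm]
        refine ih lo ((lo + hi) / 2) (by omega) (by omega) (by omega) hleft ?_
        intro t htm htl
        by_cases hte : t = (lo + hi) / 2
        · subst hte; omega
        · have := pvSortedGetD lst hs ((lo + hi) / 2) t (by omega) htl
          omega
    · rw [if_neg h]
      exact ⟨by omega, fun t ht => hleft t (by omega), fun t ht htl => hright t (by omega) htl⟩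

-- the credit loop preserves the length of the counts list
lemma pvInnerLen (j : Int) (L : List Int) (cs : List Int) :
    (L.foldl (fun cs q => cs.modify (q - j).toNat (fun t => t + 1)) cs).length = cs.length := by
  induction L generalizing cs with
  | nil => rfl
  | cons q L ihl =>
    simp only [List.foldl_cons]
    rw [ihl, List.length_modify]

-- effect of the credit loop on one cell, for positions inside the window
lemma pvInnerGetD (w j : Int) (L : List Int) (cs : List Int) (i : Nat)
    (hiw : (i : Int) < w) (hlen : cs.length = w.toNat)
    (hL : ∀ q ∈ L, j ≤ q ∧ q < j + w) :
    (L.foldl (fun cs q => cs.modify (q - j).toNat (fun t => t + 1)) cs).getD i 0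
      = cs.getD i 0 + (L.countP (fun q => decide (q = (i : Int) + j)) : Int) := by
  induction L generalizing cs with
  | nil => simp
  | cons q L ihl =>
    simp only [List.foldl_cons, List.countP_cons]
    have hq := hL q (by simp)
    rw [ihl _ (by rw [List.length_modify]; exact hlen) (fun q' hq' => hL q' (by simp [hq'])),
        pvGetD_modify]
    by_cases hp : q = (i : Int) + j
    · have h1 : (q - j).toNat = i := by omega
      have h2 : i < cs.length := by omega
      simp [h1, h2, hp]
      ring
    · have h1 : ¬ ((q - j).toNat = i ∧ i < cs.length) := by
        intro ⟨hh, _⟩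
        omega
      simp [h1, hp]

-- one cell of the counts list after the whole double loop
lemma pvOuterGetD (w : Int) (F : (Int × Char) → List Int) (E : List (Int × Char))
    (cs : List Int) (i : Nat) (hiw : (i : Int) < w) (hlen : cs.length = w.toNat)
    (hF : ∀ jc ∈ E, ∀ q ∈ F jc, jc.1 ≤ q ∧ q < jc.1 + w) :
    (E.foldl (fun cs jc => (F jc).foldl
        (fun cs q => cs.modify (q - jc.1).toNat (fun t => t + 1)) cs) cs).getD i 0
      = cs.getD i 0
        + (E.map (fun jc => ((F jc).countP (fun q => decide (q = (i : Int) + jc.1)) : Int))).sum := by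
  induction E generalizing cs with
  | nil => simp
  | cons jc E ihe =>
    simp only [List.foldl_cons, List.map_cons, List.sum_cons]
    rw [ihe _ (by rw [pvInnerLen]; exact hlen) (fun a ha => hF a (by simp [ha])),
        pvInnerGetD w jc.1 _ cs i hiw hlen (hF jc (by simp))]
    ring

-- every element of the searched window slice lies inside [j, j + ww)
lemma pvSliceMem (lst : List Int) (j ww : Int) (lo hi : Nat)
    (hlo2 : ∀ t, lo ≤ t → t < lst.length → j ≤ lst.getD t 0)
    (hhi1 : ∀ t, t < hi → lst.getD t 0 < j + ww) :
    ∀ q ∈ (lst.drop lo).take (hi - lo), j ≤ q ∧ q < j + ww := by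
  intro q hq
  obtain ⟨t, ht, rfl⟩ := List.getElem_of_mem hq
  have htl : t < hi - lo := by
    have := List.length_take_le (hi - lo) (lst.drop lo)
    omega
  have htd : lo + t < lst.length := by
    have h1 := ht
    simp only [List.length_take, List.length_drop] at h1
    omega
  have hget : ((lst.drop lo).take (hi - lo))[t] = lst.getD (lo + t) 0 := by
    rw [List.getElem_take, List.getElem_drop, List.getD_eq_getElem lst 0 htd]
  rw [hget]
  exact ⟨hlo2 (lo + t) (by omega) htd, hhi1 (lo + t) (by omega)⟩

-- counting a window value over the slice equals counting it over the whole list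
lemma pvCountSlice (lst : List Int) (v j ww : Int) (lo hi : Nat)
    (hv1 : j ≤ v) (hv2 : v < j + ww)
    (hlo1 : ∀ t, t < lo → lst.getD t 0 < j)
    (hhi1 : ∀ t, t < hi → lst.getD t 0 < j + ww)
    (hhi2 : ∀ t, hi ≤ t → t < lst.length → j + ww ≤ lst.getD t 0)
    (hlol : lo ≤ lst.length) :
    ((lst.drop lo).take (hi - lo)).countP (fun q => decide (q = v))
      = lst.countP (fun q => decide (q = v)) := by
  have hlh : lo ≤ hi := by
    by_contra hc
    have h1 := hhi2 hi (by omega) (by omega)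
    have h2 := hlo1 hi (by omega)
    omega
  conv_rhs => rw [← List.take_append_drop lo lst]
  conv_rhs => rw [show lst.drop lo = (lst.drop lo).take (hi - lo) ++ ((lst.drop lo).drop (hi - lo)) from (List.take_append_drop _ _).symm]
  rw [List.countP_append, List.countP_append]
  have hz1 : (lst.take lo).countP (fun q => decide (q = v)) = 0 := by
    apply List.countP_eq_zero.mpr
    intro q hq
    obtain ⟨t, ht, rfl⟩ := List.getElem_of_mem hq
    have htlo : t < lo := by
      have := List.length_take_le lo lst
      omega
    have htl : t < lst.length := by omega
    have hget : (lst.take lo)[t] = lst.getD t 0 := by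
      rw [List.getElem_take, List.getD_eq_getElem lst 0 htl]
    have := hlo1 t htlo
    simp only [hget, decide_eq_true_eq]
    omega
  have hz2 : ((lst.drop lo).drop (hi - lo)).countP (fun q => decide (q = v)) = 0 := by
    apply List.countP_eq_zero.mpr
    intro q hq
    rw [List.drop_drop] at hq
    obtain ⟨t, ht, rfl⟩ := List.getElem_of_mem hq
    have htl : lo + (hi - lo) + t < lst.length := by
      simp only [List.length_drop] at ht
      omega
    have hget : (lst.drop (lo + (hi - lo)))[t]'ht = lst.getD (lo + (hi - lo) + t) 0 := by
      rw [List.getElem_drop, List.getD_eq_getElem lst 0 (by omega)]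
    have := hhi2 (lo + (hi - lo) + t) (by omega) htl
    simp only [hget, decide_eq_true_eq]
    omega
  omega

-- the character index built by B's first loop: positions of c in the sequence, in order
lemma pvPosGetD (S : List Char) (c : Char) :
    ((PySem.List.enumerate S 0).foldl (fun d pc => d.modify pc.2 [] (fun l => l ++ [pc.1])) PySem.Dict.empty).getD c []
      = (((PySem.List.enumerate S 0).filter (fun pc => pc.2 == c)).map (·.1)) := by
  have h := PySem.Dict.getD_foldl_modify_append (l := (PySem.List.enumerate S 0).map Prod.swap)
      (d := PySem.Dict.empty) (c := c)
  rw [List.foldl_map] at h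
  simp only [Prod.swap] at h
  rw [h]
  simp [List.filter_map, List.map_map, Function.comp_def]

-- those positions are strictly increasing
lemma pvPosSorted (S : List Char) (c : Char) :
    ((((PySem.List.enumerate S 0).filter (fun pc => pc.2 == c)).map (·.1))).Pairwise (· < ·) := by
  apply List.Pairwise.map
  · exact fun a b h => h
  · exact (PySem.List.pairwise_lt_enumerate S 0).filter _

-- counting hits of a fixed value in a nodup list under an extra test
lemma pvCountP_nodup (l : List Int) (v : Int) (q : Int → Bool) {pr : Int → Bool} (hl : l.Nodup)
    (hpr : ∀ x, pr x = (decide (x = v) && q x)) :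
    l.countP pr = if v ∈ l ∧ q v then 1 else 0 := by
  have hfe : pr = fun x => decide (x = v) && q x := funext hpr
  subst hfe
  clear hpr
  induction l with
  | nil => simp
  | cons x l ih =>
    rw [List.countP_cons]
    rcases List.nodup_cons.mp hl with ⟨hx, hl'⟩
    by_cases hxv : x = v
    · subst hxv
      have hrest : l.countP (fun y => decide (y = x) && q y) = 0 := by
        apply List.countP_eq_zero.mpr
        intro y hy
        simp only [Bool.and_eq_true, decide_eq_true_eq]
        rintro ⟨rfl, -⟩
        exact hx hy
      by_cases hq : q x = true <;> simp [hrest, hq, hx]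
    · rw [ih hl']
      by_cases hv : v ∈ l <;> by_cases hq : q v = true <;> simp [hxv, hv, hq, Ne.symm hxv]

-- the number of occurrences of v among the recorded positions of c in S
lemma pvCountPos (S : List Char) (c : Char) (v : Int) :
    ((((PySem.List.enumerate S 0).filter (fun pc => pc.2 == c)).map (·.1)).countP (fun p => decide (p = v)))
      = if 0 ≤ v ∧ v < (S.length : Int) ∧ PySem.List.pyGetD S v 'a' = c then 1 else 0 := by
  rw [PySem.List.enumerate_eq_map_pyRange S 'a', List.filter_map, List.map_map,
      List.countP_map, List.countP_filter]
  refine Eq.trans (pvCountP_nodup (PySem.List.pyRange 0 (PySem.List.len S) 1) v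
      (fun t => PySem.List.pyGetD S t 'a' == c) (PySem.List.nodup_pyRange_one ..) ?_) ?_
  · intro x; rfl
  · by_cases hmem : v ∈ PySem.List.pyRange 0 (PySem.List.len S) 1
    · have hb := (PySem.List.mem_pyRange_one).mp hmem
      simp only [PySem.List.len_eq] at hb
      by_cases hq : PySem.List.pyGetD S v 'a' = c
      · simp [hmem, hq, hb]
      · simp [hq, hb]
    · have hb : ¬ (0 ≤ v ∧ v < (S.length : Int)) := by
        intro hvv
        exact hmem ((PySem.List.mem_pyRange_one).mpr (by simp [PySem.List.len_eq]; omega))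
      rw [if_neg (by tauto), if_neg (by tauto)]

-- a sum of 0/1 indicators over a list is a count
lemma pvSumIte (l : List Int) (f : Int → Int) (q : Int → Bool)
    (h : ∀ j ∈ l, f j = if q j then 1 else 0) : (l.map f).sum = (l.countP q : Int) := by
  rw [List.map_congr_left h, PySem.List.sum_map_ite_one_zero]

-- the two programs return the same list on every input
lemma pvMain (s p : String) (k : Int) : naive_match s p k = naive_match_alt s p k := by
  unfold naive_match naive_match_alt
  dsimp only
  rw [PySem.List.foldl_append_ite_eq_filter, List.nil_append]
  by_cases hw : (PySem.List.len s.toList - PySem.List.len p.toList + 1) ≤ 0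
  · rw [if_pos hw]
    have h0 : PySem.List.pyRange 0 (PySem.List.len s.toList - PySem.List.len p.toList + 1) 1 = [] :=
      PySem.List.pyRange_one_eq_nil (by simp only [PySem.List.len_eq] at hw ⊢; omega)
    rw [h0]
    rfl
  · rw [if_neg hw]
    set pos := (PySem.List.enumerate s.toList 0).foldl
        (fun d pc => d.modify pc.2 [] (fun l => l ++ [pc.1])) PySem.Dict.empty with hposd
    set W := PySem.List.len s.toList - PySem.List.len p.toList + 1 with hWd
    have hposget : ∀ c : Char, pos.getD c []
        = (((PySem.List.enumerate s.toList 0).filter (fun pc => pc.2 == c)).map (·.1)) := by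
      intro c
      rw [hposd]
      exact pvPosGetD s.toList c
    apply List.filter_congr
    intro i hi
    have hmem := (PySem.List.mem_pyRange_one).mp hi
    apply decide_eq_decide.mpr
    rw [PySem.List.foldl_if_add_one, zero_add]
    have h0i : 0 ≤ i := hmem.1
    have hiw : i < W := hmem.2
    rw [show i = ((i.toNat : Nat) : Int) from (Int.toNat_of_nonneg h0i).symm]
    rw [PySem.List.pyGetD_natCast]
    have hF : ∀ jc ∈ PySem.List.enumerate p.toList 0,
        ∀ q ∈ (fun jc : Int × Char => PySem.List.slice (pos.getD jc.2 [])
            (some ((pvLowerGo (pos.getD jc.2 []) jc.1 (pos.getD jc.2 []).length 0 (pos.getD jc.2 []).length : Nat) : Int))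
            (some ((pvLowerGo (pos.getD jc.2 []) (jc.1 + W) (pos.getD jc.2 []).length 0 (pos.getD jc.2 []).length : Nat) : Int))) jc,
          jc.1 ≤ q ∧ q < jc.1 + W := by
      intro jc _ q hq
      simp only [hposget jc.2] at hq
      have hsor := pvPosSorted s.toList jc.2
      have hs1 := pvLowerGo_spec (((PySem.List.enumerate s.toList 0).filter
          (fun pc => pc.2 == jc.2)).map (·.1)) jc.1 hsor (((PySem.List.enumerate s.toList 0).filter
          (fun pc => pc.2 == jc.2)).map (·.1)).length 0 (((PySem.List.enumerate s.toList 0).filter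
          (fun pc => pc.2 == jc.2)).map (·.1)).length (by omega) le_rfl (by omega)
          (by intro t ht; omega) (by intro t ht htl; omega)
      have hs2 := pvLowerGo_spec (((PySem.List.enumerate s.toList 0).filter
          (fun pc => pc.2 == jc.2)).map (·.1)) (jc.1 + W) hsor (((PySem.List.enumerate s.toList 0).filter
          (fun pc => pc.2 == jc.2)).map (·.1)).length 0 (((PySem.List.enumerate s.toList 0).filter
          (fun pc => pc.2 == jc.2)).map (·.1)).length (by omega) le_rfl (by omega)
          (by intro t ht; omega) (by intro t ht htl; omega)
      rw [PySem.List.slice_natCast] at hq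
      exact pvSliceMem _ jc.1 W _ _ hs1.2.2 hs2.2.1 q hq
    rw [pvOuterGetD W
        (fun jc : Int × Char => PySem.List.slice (pos.getD jc.2 [])
            (some ((pvLowerGo (pos.getD jc.2 []) jc.1 (pos.getD jc.2 []).length 0 (pos.getD jc.2 []).length : Nat) : Int))
            (some ((pvLowerGo (pos.getD jc.2 []) (jc.1 + W) (pos.getD jc.2 []).length 0 (pos.getD jc.2 []).length : Nat) : Int)))
        (PySem.List.enumerate p.toList 0)
        (List.replicate W.toNat 0)
        i.toNat (by omega) (List.length_replicate) hF, pvGetD_replicate, zero_add]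
    rw [PySem.List.enumerate_eq_map_pyRange p.toList 'a', List.map_map]
    rw [pvSumIte _ _ (fun j => PySem.List.pyGet? s.toList ((i.toNat : Int) + j) == PySem.List.pyGet? p.toList j) ?_]
    intro j hj
    have hjb := (PySem.List.mem_pyRange_one).mp hj
    simp only [PySem.List.len_eq] at hjb
    simp only [Function.comp_apply]
    simp only [hposget (PySem.List.pyGetD p.toList j 'a')]
    have hsor := pvPosSorted s.toList (PySem.List.pyGetD p.toList j 'a')
    have hs1 := pvLowerGo_spec (((PySem.List.enumerate s.toList 0).filter
        (fun pc => pc.2 == PySem.List.pyGetD p.toList j 'a')).map (·.1)) j hsor (((PySem.List.enumerate s.toList 0).filter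
        (fun pc => pc.2 == PySem.List.pyGetD p.toList j 'a')).map (·.1)).length 0 (((PySem.List.enumerate s.toList 0).filter
        (fun pc => pc.2 == PySem.List.pyGetD p.toList j 'a')).map (·.1)).length (by omega) le_rfl (by omega) (by intro t ht; omega) (by intro t ht htl; omega)
    have hs2 := pvLowerGo_spec (((PySem.List.enumerate s.toList 0).filter
        (fun pc => pc.2 == PySem.List.pyGetD p.toList j 'a')).map (·.1)) (j + W) hsor (((PySem.List.enumerate s.toList 0).filter
        (fun pc => pc.2 == PySem.List.pyGetD p.toList j 'a')).map (·.1)).length 0 (((PySem.List.enumerate s.toList 0).filter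
        (fun pc => pc.2 == PySem.List.pyGetD p.toList j 'a')).map (·.1)).length (by omega) le_rfl (by omega) (by intro t ht; omega) (by intro t ht htl; omega)
    rw [PySem.List.slice_natCast]
    rw [pvCountSlice _ ((i.toNat : Int) + j) j W _ _ (by omega) (by omega)
        hs1.2.1 hs2.2.1 hs2.2.2 hs1.1]
    rw [pvCountPos]
    have hWl : W = (s.toList.length : Int) - (p.toList.length : Int) + 1 := by
      rw [hWd]; simp only [PySem.List.len_eq]
    have hsj : (0:Int) ≤ (i.toNat : Int) + j ∧ ((i.toNat : Int) + j) < (s.toList.length : Int) := by omega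
    have hpj : (0:Int) ≤ j ∧ j < (p.toList.length : Int) := hjb
    simp only [Int.toNat_of_nonneg h0i] at hsj ⊢
    simp only [PySem.List.pyGet?_eq_some_getElem _ hsj.1 hsj.2,
        PySem.List.pyGet?_eq_some_getElem _ hpj.1 hpj.2,
        PySem.List.pyGetD_eq_getElem _ _ hsj.1 hsj.2,
        PySem.List.pyGetD_eq_getElem _ _ hpj.1 hpj.2]
    by_cases hab : s.toList[(i + j).toNat]'(by omega) = p.toList[j.toNat]'(by omega)
    · have hsl : i + j < (s.length : Int) := by
        have : s.toList.length = s.length := by simp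
        omega
      simp [hab, hsj.1, hsl]
    · simp [hab, hsj.1]

-- ===== VERDICT (by name: the statement is the Claim_ definition above) =====
theorem naive_match_spec : Claim_equal_naive_match := by
  intro sequence pattern k _
  exact pvMain sequence pattern k
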